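-- pv_equiv track=rewrite | github.com/KaterinaMutafova/SoftUni | Python Advanced/2. Tuples_and_sets/Tuple_lab_ex5.py | separate_guests
-- ===== SOURCE A (Python) =====
-- def is_vip(g):
--     return g[0].isdigit()
--
-- def separate_guests(not_a):
--     vip_guest = []
--     reg_guest = []
--     for g in not_a:
--         if is_vip(g):
--             vip_guest.append(g)
--         else:
--             reg_guest.append(g)
--     return (sorted(vip_guest), sorted(reg_guest))
-- ===== SOURCE B (Python) =====
-- def separate_guests(not_a):
--     vip_guest = []
--     reg_guest = []
--     for g in not_a:
--         lst = vip_guest if g[0].isdigit() else reg_guest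
--         lo, hi = 0, len(lst)
--         while lo < hi:
--             mid = (lo + hi) // 2
--             if lst[mid] <= g:
--                 lo = mid + 1
--             else:
--                 hi = mid
--         lst.insert(lo, g)
--     return (vip_guest, reg_guest)
-- ===== Notes on version B (the rewrite author's own statement) =====
-- stated objective: alternative
-- what changed: A buffers all guests into two lists and calls sorted() on each bucket at the end; B never calls sorted(): it keeps each bucket sorted at all times, binary-searching the insertion point for every guest and inserting it there (online insertion sort per bucket).
import Mathlib
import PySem

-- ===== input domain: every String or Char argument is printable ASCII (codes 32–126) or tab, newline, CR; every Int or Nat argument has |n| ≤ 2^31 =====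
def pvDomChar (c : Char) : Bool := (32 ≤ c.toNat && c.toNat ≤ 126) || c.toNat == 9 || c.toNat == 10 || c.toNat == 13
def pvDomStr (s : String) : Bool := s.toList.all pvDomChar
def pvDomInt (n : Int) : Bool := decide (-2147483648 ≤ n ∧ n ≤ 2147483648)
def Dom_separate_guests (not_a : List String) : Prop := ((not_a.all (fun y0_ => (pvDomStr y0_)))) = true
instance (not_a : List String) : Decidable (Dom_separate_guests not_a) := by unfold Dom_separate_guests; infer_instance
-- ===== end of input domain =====

-- B replaces A's buffer-then-sort with an online insertion sort: each guest is binary-search-inserted at its ordered position in its bucket, no sorted() call; return value identical.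


-- ===== PORT A =====
-- g[0].isdigit(); the 'none' (IndexError on g = "") case is excluded by Pre_
def is_vip (g : String) : Bool :=
  match PySem.Str.pyGet? g 0 with
  | some c => PySem.Chars.isdigit c
  | none => false

def separate_guests (not_a : List String) : List String × List String :=
  let p := not_a.foldl
    (fun (acc : List String × List String) g =>
      if is_vip g then (acc.1 ++ [g], acc.2) else (acc.1, acc.2 ++ [g]))
    ([], [])
  (PySem.List.sorted p.1 (fun x => x) false, PySem.List.sorted p.2 (fun x => x) false)

-- ===== PORT B =====
-- the while loop 'lo, hi = 0, len(lst); while lo < hi: mid = (lo+hi)//2; …'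
-- (lst[mid] is always in range when called with hi ≤ len(lst); getD's default is never used)
def bsLoop (lst : List String) (g : String) (lo hi : Nat) : Nat :=
  if lo < hi then
    let mid := (lo + hi) / 2
    if lst.getD mid "" ≤ g then bsLoop lst g (mid + 1) hi
    else bsLoop lst g lo mid
  else lo
termination_by hi - lo
decreasing_by all_goals omega

def separate_guests_alt (not_a : List String) : List String × List String :=
  not_a.foldl
    (fun (acc : List String × List String) g =>
      if is_vip g then
        (PySem.List.insert acc.1 (bsLoop acc.1 g 0 acc.1.length) g, acc.2)
      else
        (acc.1, PySem.List.insert acc.2 (bsLoop acc.2 g 0 acc.2.length) g))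
    ([], [])

-- ===== PRECONDITION & SPEC =====
-- Pre_ excludes lists containing an empty string: there A (and B) raises IndexError on g[0].
def Pre_separate_guests (not_a : List String) : Prop := ∀ g ∈ not_a, g ≠ ""
instance (not_a : List String) : Decidable (Pre_separate_guests not_a) := by unfold Pre_separate_guests; infer_instance
def pvWitness_separate_guests : List String := ["5a", "bob", "1x"]

def Spec_separate_guests (not_a : List String) (out : List String × List String) : Prop := out = separate_guests_alt not_a
instance (not_a : List String) (out : List String × List String) : Decidable (Spec_separate_guests not_a out) := by unfold Spec_separate_guests; infer_instance

-- ===== CLAIM (what is proved, stated in full; the proofs are below) =====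
def Claim_equal_separate_guests : Prop := ∀ (not_a : List String), Dom_separate_guests not_a → Pre_separate_guests not_a → Spec_separate_guests not_a (separate_guests not_a)

-- ===== LEMMAS AND PROOFS =====

-- proof-side model of inserting into a sorted list (place g before the first element > g)
def insSorted (lst : List String) (g : String) : List String :=
  match lst with
  | [] => [g]
  | x :: xs => if x ≤ g then x :: insSorted xs g else g :: x :: xs

theorem insSorted_perm (lst : List String) (g : String) :
    (insSorted lst g).Perm (g :: lst) := by
  induction lst with
  | nil => simp [insSorted]
  | cons x xs ih =>
    simp only [insSorted]
    split_ifs with h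
    · exact ((ih.cons x).trans (List.Perm.swap g x xs))
    · exact List.Perm.refl _

theorem mem_insSorted {y g : String} {lst : List String} (h : y ∈ insSorted lst g) :
    y = g ∨ y ∈ lst := by
  have := (insSorted_perm lst g).mem_iff.mp h
  simpa using this

theorem insSorted_pairwise (lst : List String) (g : String)
    (h : lst.Pairwise (· ≤ ·)) : (insSorted lst g).Pairwise (· ≤ ·) := by
  induction lst with
  | nil => simp [insSorted]
  | cons x xs ih =>
    simp only [insSorted]
    rcases List.pairwise_cons.mp h with ⟨hx, hxs⟩
    split_ifs with hle
    · refine List.pairwise_cons.mpr ⟨?_, ih hxs⟩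
      intro y hy
      rcases mem_insSorted hy with rfl | hy
      · exact hle
      · exact hx y hy
    · refine List.pairwise_cons.mpr ⟨?_, h⟩
      intro y hy
      rcases List.mem_cons.mp hy with rfl | hy
      · exact le_of_lt (lt_of_not_ge hle)
      · exact le_trans (le_of_lt (lt_of_not_ge hle)) (hx y hy)

-- insSorted is take-while-≤ ++ g ++ drop-while-≤ (no sortedness needed)
theorem insSorted_eq_takeWhile (lst : List String) (g : String) :
    insSorted lst g
      = lst.takeWhile (fun x => decide (x ≤ g)) ++ g :: lst.dropWhile (fun x => decide (x ≤ g)) := by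
  induction lst with
  | nil => simp [insSorted]
  | cons x xs ih =>
    simp only [insSorted, List.takeWhile, List.dropWhile]
    split_ifs with h <;> simp [h, ih]

-- every index below the takeWhile length satisfies the predicate
theorem takeWhile_getElem_sat (p : String → Bool) (l : List String) (i : Nat)
    (h : i < (l.takeWhile p).length) (h2 : i < l.length) : p l[i] = true := by
  have := List.mem_takeWhile_imp (l := l) (p := p) (List.getElem_mem h)
  rwa [(List.takeWhile_prefix p).getElem h] at this

-- the element right after the takeWhile prefix fails the predicate
theorem takeWhile_stop (p : String → Bool) (l : List String)
    (h : (l.takeWhile p).length < l.length) :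
    p (l[(l.takeWhile p).length]) = false := by
  set t := (l.takeWhile p).length with ht
  have hsplit : l.takeWhile p ++ l.dropWhile p = l := List.takeWhile_append_dropWhile
  have hd : l.dropWhile p ≠ [] := by
    intro hnil
    rw [← hsplit, hnil, List.append_nil] at h
    omega
  have hhead := List.head_dropWhile_not p hd
  have hq : l[t]? = some ((l.dropWhile p).head hd) := by
    conv_lhs => rw [← hsplit]
    rw [List.getElem?_append_right (by omega)]
    simp only [ht, Nat.sub_self]
    rw [List.getElem?_eq_getElem (by exact List.length_pos_of_ne_nil hd)]
    simp [List.getElem_zero_eq_head]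
  have hv : l[t]? = some l[t] := List.getElem?_eq_getElem h
  rw [hv] at hq
  rw [Option.some.injEq] at hq
  rw [hq]
  exact hhead

-- the binary search returns the takeWhile length, on a sorted list
theorem bsLoop_eq (lst : List String) (g : String) (hs : lst.Pairwise (· ≤ ·)) :
    ∀ (n lo hi : Nat), hi - lo ≤ n →
      lo ≤ (lst.takeWhile (fun x => decide (x ≤ g))).length →
      (lst.takeWhile (fun x => decide (x ≤ g))).length ≤ hi →
      hi ≤ lst.length →
      bsLoop lst g lo hi = (lst.takeWhile (fun x => decide (x ≤ g))).length := by
  set p : String → Bool := fun x => decide (x ≤ g) with hp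
  set t := (lst.takeWhile p).length with htdef
  intro n
  induction n with
  | zero =>
    intro lo hi hfuel hlo hhi hlen
    rw [bsLoop, if_neg (by omega)]
    omega
  | succ n ih =>
    intro lo hi hfuel hlo hhi hlen
    by_cases hcmp : lo < hi
    · rw [bsLoop, if_pos hcmp]
      show (if lst.getD ((lo + hi) / 2) "" ≤ g then bsLoop lst g ((lo + hi) / 2 + 1) hi
            else bsLoop lst g lo ((lo + hi) / 2)) = t
      have hmid1 : (lo + hi) / 2 < hi := by omega
      have hmid2 : lo ≤ (lo + hi) / 2 := by omega
      set mid := (lo + hi) / 2 with hmid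
      have hmlen : mid < lst.length := by omega
      have hget : lst.getD mid "" = lst[mid] := List.getD_eq_getElem lst "" hmlen
      by_cases hle : lst[mid] ≤ g
      · rw [if_pos (by rw [hget]; exact hle)]
        refine ih (mid + 1) hi (by omega) ?_ hhi hlen
        -- mid < t: otherwise t ≤ mid and lst[t] would satisfy p by sortedness
        by_contra hmt
        push_neg at hmt
        have htm : t ≤ mid := by omega
        have htl : t < lst.length := by omega
        have hfail : p lst[t] = false := takeWhile_stop p lst (by omega)
        have hsat : lst[t] ≤ g := by
          rcases Nat.lt_or_ge t mid with hlt | hge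
          · have := (List.pairwise_iff_getElem.mp hs) t mid htl hmlen hlt
            exact le_trans this hle
          · have heq : lst[t] = lst[mid] := by
              have : t = mid := by omega
              simp [this]
            rw [heq]; exact hle
        simp only [hp] at hfail
        exact of_decide_eq_false hfail hsat
      · rw [if_neg (by rw [hget]; exact hle)]
        refine ih lo mid (by omega) hlo ?_ (by omega)
        -- t ≤ mid: otherwise lst[mid] would satisfy p
        by_contra hmt
        push_neg at hmt
        have := takeWhile_getElem_sat p lst mid (by omega) hmlen
        simp only [hp] at this
        exact hle (of_decide_eq_true this)
    · rw [bsLoop, if_neg hcmp]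
      omega

-- PySem.List.insert at a position ≤ length is take/drop insertion
theorem pyInsert_take_drop (lst : List String) (k : Nat) (g : String) (h : k ≤ lst.length) :
    PySem.List.insert lst (k : Int) g = lst.take k ++ g :: lst.drop k := by
  simp only [PySem.List.insert, PySem.List.sliceIndices]
  rw [if_neg (by omega)]
  have h1 : (if (1:Int) < 0 then (lst.length:Int) - 1 else (lst.length:Int)) = lst.length := by
    norm_num
  rw [h1]
  have h2 : min (k:Int) (lst.length:Int) = (k:Int) := by omega
  rw [h2]
  simp

-- on a sorted list, B's binary-search insertion is exactly insSorted
theorem pyInsert_eq_insSorted (lst : List String) (g : String)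
    (hs : lst.Pairwise (· ≤ ·)) :
    PySem.List.insert lst (bsLoop lst g 0 lst.length : Int) g = insSorted lst g := by
  set p : String → Bool := fun x => decide (x ≤ g) with hp
  set t := (lst.takeWhile p).length with htdef
  have htle : t ≤ lst.length := by
    rw [htdef]; exact (List.takeWhile_sublist p).length_le
  have hbs : bsLoop lst g 0 lst.length = t :=
    bsLoop_eq lst g hs lst.length 0 lst.length (by omega) (by omega) htle (le_refl _)
  rw [hbs, pyInsert_take_drop lst t g htle, insSorted_eq_takeWhile]
  have hsplit : lst.takeWhile p ++ lst.dropWhile p = lst := List.takeWhile_append_dropWhile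
  have htake : lst.take t = lst.takeWhile p := by
    conv_lhs => rw [← hsplit]
    rw [htdef, List.take_left]
  have hdrop : lst.drop t = lst.dropWhile p := by
    conv_lhs => rw [← hsplit]
    rw [htdef, List.drop_left]
  rw [htake, hdrop]

-- folding insSorted from a sorted accumulator produces sorted(acc ++ ys)
theorem foldl_insSorted (ys acc : List String) (hp : acc.Pairwise (· ≤ ·)) :
    ys.foldl insSorted acc = PySem.List.sorted (acc ++ ys) (fun x => x) false := by
  induction ys generalizing acc with
  | nil =>
    simp only [List.foldl_nil, List.append_nil]
    exact (PySem.List.sorted_eq_self_of_pairwise acc (fun x => x) hp).symm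
  | cons y ys ih =>
    simp only [List.foldl_cons]
    rw [ih _ (insSorted_pairwise acc y hp)]
    apply PySem.List.sorted_eq_sorted_of_perm _ _ _ (fun a b h => h)
    exact ((insSorted_perm acc y).append_right ys).trans List.perm_middle.symm

-- the partition fold of A yields the two filters
theorem foldl_partition (p : String → Bool) (xs a b : List String) :
    xs.foldl
      (fun (acc : List String × List String) g =>
        if p g then (acc.1 ++ [g], acc.2) else (acc.1, acc.2 ++ [g]))
      (a, b)
    = (a ++ xs.filter p, b ++ xs.filter (fun g => !p g)) := by
  induction xs generalizing a b with
  | nil => simp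
  | cons x xs ih =>
    by_cases h : p x <;> simp [h, ih]

-- B's fold splits into two independent insSorted folds over the filters
theorem foldl_split (xs a b : List String)
    (ha : a.Pairwise (· ≤ ·)) (hb : b.Pairwise (· ≤ ·)) :
    xs.foldl
      (fun (acc : List String × List String) g =>
        if is_vip g then
          (PySem.List.insert acc.1 (bsLoop acc.1 g 0 acc.1.length) g, acc.2)
        else
          (acc.1, PySem.List.insert acc.2 (bsLoop acc.2 g 0 acc.2.length) g))
      (a, b)
    = ((xs.filter is_vip).foldl insSorted a,
       (xs.filter (fun g => !is_vip g)).foldl insSorted b) := by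
  induction xs generalizing a b with
  | nil => simp
  | cons x xs ih =>
    by_cases h : is_vip x <;>
      simp [h, pyInsert_eq_insSorted _ _ ha, pyInsert_eq_insSorted _ _ hb,
        ih _ _ (insSorted_pairwise _ _ ha) hb, ih _ _ ha (insSorted_pairwise _ _ hb)]

-- ===== VERDICT (by name: the statement is the Claim_ definition above) =====
theorem separate_guests_spec : Claim_equal_separate_guests := by
  intro not_a _ _
  show _ = _
  rw [separate_guests, separate_guests_alt, foldl_split _ _ _ List.Pairwise.nil List.Pairwise.nil,
    foldl_partition]
  simp only [List.nil_append]
  rw [foldl_insSorted _ _ List.Pairwise.nil, foldl_insSorted _ _ List.Pairwise.nil]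
  simp
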